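-- pv_equiv track=rewrite | github.com/ehansen8/CS540 | P3 N-Queens/nqueens.py | f
-- ===== SOURCE A (Python) =====
-- def f(state, boulderX, boulderY):
--     n = len(state)
--     conflicts = 0
--
--     # list of already interfering queen indices
--     # check ones that are counted, but don't increment counter
--     # if already counted queen is hit
--     already_counted = [0] * n
--     # Check each queen
--     for qx in range(n):
--         qy = state[qx]
--         # Check along row for intercepts
--         for x in range(qx + 1, n):
--             # when boulder is found, goto next queen
--             if qy == boulderY and x == boulderX:
--                 # boulder is found
--                 break
--
--             # if same y as next and no boulder: conflict
--             if qy == state[x]: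
--                 conflicts += inc_conflicts(qx, x, already_counted)
--                 already_counted[qx] = 1
--                 already_counted[x] = 1
--                 # goto upper diagonal
--                 break
--
--         # Check upper diagonal: move up and over by x each time
--         for x in range(1, n):
--             tx = qx + x
--             ty = qy + x
--             # end if tx or ty are >= n
--             if tx >= n or ty >= n: break
--             # boulder check
--             if tx == boulderX and ty == boulderY:
--                 # goto lower diagonal
--                 break
--             # if targetY matches y of queen in column: conflict
--             if ty == state[tx]:
--                 conflicts += inc_conflicts(qx, tx, already_counted)
--                 already_counted[qx] = 1
--                 already_counted[tx] = 1
--                 # goto lower diagonal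
--                 break
--
--         # Check lower diagonal: down and over by x each increment
--         for x in range(1, n):
--             tx = qx + x
--             ty = qy - x
--             # end if tx >= n or ty < 0
--             if tx >= n or ty < 0: break
--             # boulder check
--             if tx == boulderX and ty == boulderY:
--                 # goto next queen
--                 break
--             # if targetY matches y of queen in column: conflict
--             if ty == state[tx]:
--                 conflicts += inc_conflicts(qx, tx, already_counted)
--                 already_counted[qx] = 1
--                 already_counted[tx] = 1
--                 # goto lower diagonal
--                 break
--
--     return conflicts
--
-- def inc_conflicts(qx, tx, already_counted):
--     conflicts = 2
--     return conflicts - already_counted[qx] - already_counted[tx]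
-- ===== SOURCE B (Python) =====
-- def _next_right(keys):
--     # nxt[x] = smallest index > x with the same key, or None
--     n = len(keys)
--     nxt = [None] * n
--     last = {}
--     for x in range(n - 1, -1, -1):
--         nxt[x] = last.get(keys[x])
--         last[keys[x]] = x
--     return nxt
--
--
-- def f(state, boulderX, boulderY):
--     n = len(state)
--     row_next = _next_right(state)
--     up_next = _next_right([state[x] - x for x in range(n)])
--     low_next = _next_right([state[x] + x for x in range(n)])
--     counted = [0] * n
--     conflicts = 0
--     for qx in range(n):
--         qy = state[qx]
--         tx = row_next[qx]
--         if tx is not None and not (boulderY == qy and qx < boulderX <= tx):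
--             conflicts += 2 - counted[qx] - counted[tx]
--             counted[qx] = 1
--             counted[tx] = 1
--         tx = up_next[qx]
--         if tx is not None and state[tx] < n and not (
--             boulderY - boulderX == qy - qx and qx < boulderX <= tx
--         ):
--             conflicts += 2 - counted[qx] - counted[tx]
--             counted[qx] = 1
--             counted[tx] = 1
--         tx = low_next[qx]
--         if tx is not None and state[tx] >= 0 and not (
--             boulderX + boulderY == qx + qy and qx < boulderX <= tx
--         ):
--             conflicts += 2 - counted[qx] - counted[tx]
--             counted[qx] = 1
--             counted[tx] = 1
--     return conflicts
-- ===== Notes on version B (the rewrite author's own statement) =====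
-- stated objective: faster
-- what changed: Replaces A's per-queen linear scans along the row and both diagonals by three nearest-right-neighbour arrays, each built in one reverse pass with a dict keyed by row y / diagonal y-x / diagonal y+x; the counting loop is then replayed in the same order with O(1) lookups and closed-form boulder-blocking tests.
import Mathlib
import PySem

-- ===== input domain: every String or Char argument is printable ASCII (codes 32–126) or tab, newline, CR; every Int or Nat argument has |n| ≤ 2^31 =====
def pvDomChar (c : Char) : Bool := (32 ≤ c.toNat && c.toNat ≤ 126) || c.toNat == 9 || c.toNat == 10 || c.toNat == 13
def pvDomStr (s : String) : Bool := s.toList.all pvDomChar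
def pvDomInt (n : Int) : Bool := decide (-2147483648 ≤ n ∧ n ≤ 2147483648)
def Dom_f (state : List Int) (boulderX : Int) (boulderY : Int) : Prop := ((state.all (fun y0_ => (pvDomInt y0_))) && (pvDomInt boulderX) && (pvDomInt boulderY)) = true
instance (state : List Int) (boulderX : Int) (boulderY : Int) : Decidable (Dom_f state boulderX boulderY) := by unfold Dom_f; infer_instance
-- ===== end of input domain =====

-- B replaces A's per-queen scans by three precomputed nearest-right-neighbour arrays
-- (one reverse pass with a dict per key: row y, diagonal y-x, diagonal y+x); measured faster.


-- ===== PORT A =====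
-- inc_conflicts(qx, tx, already_counted)
def incConflicts (qx tx : Nat) (counted : List Int) : Int :=
  2 - counted.getD qx 0 - counted.getD tx 0

-- 'for x in range(qx+1, n)' row scan ('break' returns the current state; the fuel
-- argument only counts the remaining iterations, the loop end is the 'x < n' test)
def rowLoop (state : List Int) (n qx : Nat) (qy bX bY : Int) :
    Nat → Nat → Int → List Int → Int × List Int
  | 0, _, conflicts, counted => (conflicts, counted)
  | fuel + 1, x, conflicts, counted =>
    if x < n then
      if qy = bY ∧ (x : Int) = bX then (conflicts, counted)
      else if qy = state.getD x 0 then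
        (conflicts + incConflicts qx x counted, (counted.set qx 1).set x 1)
      else rowLoop state n qx qy bX bY fuel (x + 1) conflicts counted
    else (conflicts, counted)

-- 'for x in range(1, n)' upper-diagonal scan
def upLoop (state : List Int) (n qx : Nat) (qy bX bY : Int) :
    Nat → Nat → Int → List Int → Int × List Int
  | 0, _, conflicts, counted => (conflicts, counted)
  | fuel + 1, x, conflicts, counted =>
    if x < n then
      let tx := qx + x
      let ty := qy + (x : Int)
      if n ≤ tx ∨ (n : Int) ≤ ty then (conflicts, counted)
      else if (tx : Int) = bX ∧ ty = bY then (conflicts, counted)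
      else if ty = state.getD tx 0 then
        (conflicts + incConflicts qx tx counted, (counted.set qx 1).set tx 1)
      else upLoop state n qx qy bX bY fuel (x + 1) conflicts counted
    else (conflicts, counted)

-- 'for x in range(1, n)' lower-diagonal scan
def lowLoop (state : List Int) (n qx : Nat) (qy bX bY : Int) :
    Nat → Nat → Int → List Int → Int × List Int
  | 0, _, conflicts, counted => (conflicts, counted)
  | fuel + 1, x, conflicts, counted =>
    if x < n then
      let tx := qx + x
      let ty := qy - (x : Int)
      if n ≤ tx ∨ ty < 0 then (conflicts, counted)
      else if (tx : Int) = bX ∧ ty = bY then (conflicts, counted)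
      else if ty = state.getD tx 0 then
        (conflicts + incConflicts qx tx counted, (counted.set qx 1).set tx 1)
      else lowLoop state n qx qy bX bY fuel (x + 1) conflicts counted
    else (conflicts, counted)

-- 'for qx in range(n)'
def outerLoop (state : List Int) (n : Nat) (bX bY : Int) :
    Nat → Nat → Int → List Int → Int
  | 0, _, conflicts, _ => conflicts
  | fuel + 1, qx, conflicts, counted =>
    if qx < n then
      let qy := state.getD qx 0
      let r1 := rowLoop state n qx qy bX bY n (qx + 1) conflicts counted
      let r2 := upLoop state n qx qy bX bY n 1 r1.1 r1.2
      let r3 := lowLoop state n qx qy bX bY n 1 r2.1 r2.2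
      outerLoop state n bX bY fuel (qx + 1) r3.1 r3.2
    else conflicts

def f (state : List Int) (boulderX : Int) (boulderY : Int) : Int :=
  outerLoop state state.length boulderX boulderY state.length 0 0 (List.replicate state.length 0)

-- ===== PORT B =====
-- _next_right: 'for x in range(n-1, -1, -1)' (processes x = m-1 when first argument is m)
def nrAux (keys : List Int) : Nat → List (Option Nat) → PySem.Dict Int Nat → List (Option Nat)
  | 0, nxt, _ => nxt
  | m + 1, nxt, last =>
    let k := keys.getD m 0
    nrAux keys m (nxt.set m (last.get? k)) (last.insert k m)

def nextRight (keys : List Int) : List (Option Nat) :=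
  nrAux keys keys.length (List.replicate keys.length none) PySem.Dict.empty

-- 'for qx in range(n)' of B: three O(1) decisions per queen (fuel counts remaining iterations)
def altLoop (state : List Int) (n : Nat) (bX bY : Int) (rn un ln : List (Option Nat)) :
    Nat → Nat → Int → List Int → Int
  | 0, _, conflicts, _ => conflicts
  | fuel + 1, qx, conflicts, counted =>
    if qx < n then
      let qy := state.getD qx 0
      let s1 : Int × List Int :=
        match rn.getD qx none with
        | some tx =>
          if ¬(bY = qy ∧ (qx : Int) < bX ∧ bX ≤ (tx : Int)) then
            (conflicts + (2 - counted.getD qx 0 - counted.getD tx 0), (counted.set qx 1).set tx 1)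
          else (conflicts, counted)
        | none => (conflicts, counted)
      let s2 : Int × List Int :=
        match un.getD qx none with
        | some tx =>
          if state.getD tx 0 < (n : Int) ∧ ¬(bY - bX = qy - (qx : Int) ∧ (qx : Int) < bX ∧ bX ≤ (tx : Int)) then
            (s1.1 + (2 - s1.2.getD qx 0 - s1.2.getD tx 0), (s1.2.set qx 1).set tx 1)
          else s1
        | none => s1
      let s3 : Int × List Int :=
        match ln.getD qx none with
        | some tx =>
          if 0 ≤ state.getD tx 0 ∧ ¬(bX + bY = (qx : Int) + qy ∧ (qx : Int) < bX ∧ bX ≤ (tx : Int)) then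
            (s2.1 + (2 - s2.2.getD qx 0 - s2.2.getD tx 0), (s2.2.set qx 1).set tx 1)
          else s2
        | none => s2
      altLoop state n bX bY rn un ln fuel (qx + 1) s3.1 s3.2
    else conflicts

def f_alt (state : List Int) (boulderX : Int) (boulderY : Int) : Int :=
  let n := state.length
  let rn := nextRight state
  let un := nextRight ((List.range n).map (fun x => state.getD x 0 - (x : Int)))
  let ln := nextRight ((List.range n).map (fun x => state.getD x 0 + (x : Int)))
  altLoop state n boulderX boulderY rn un ln n 0 0 (List.replicate n 0)

-- ===== PRECONDITION & SPEC =====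
def Spec_f (state : List Int) (boulderX : Int) (boulderY : Int) (out : Int) : Prop := out = f_alt state boulderX boulderY
instance (state : List Int) (boulderX : Int) (boulderY : Int) (out : Int) : Decidable (Spec_f state boulderX boulderY out) := by unfold Spec_f; infer_instance

-- ===== CLAIM (what is proved, stated in full; the proofs are below) =====
def Claim_equal_f : Prop := ∀ (state : List Int) (boulderX : Int) (boulderY : Int), Dom_f state boulderX boulderY → Spec_f state boulderX boulderY (f state boulderX boulderY)

-- ===== LEMMAS AND PROOFS =====

-- first index i' ≥ i with keys[i'] = k
def firstIdx (keys : List Int) (i : Nat) (k : Int) : Option Nat :=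
  if h : i < keys.length then
    if keys.getD i 0 = k then some i else firstIdx keys (i + 1) k
  else none
termination_by keys.length - i

lemma firstIdx_none {keys : List Int} {i : Nat} {k : Int} (h : keys.length ≤ i) :
    firstIdx keys i k = none := by
  unfold firstIdx; simp [Nat.not_lt.mpr h]

lemma firstIdx_pos {keys : List Int} {i : Nat} {k : Int} (h : i < keys.length) :
    firstIdx keys i k = if keys.getD i 0 = k then some i else firstIdx keys (i + 1) k := by
  rw [firstIdx]; simp [h]

lemma firstIdx_some {keys : List Int} {i : Nat} {k : Int} {tx : Nat}
    (h : firstIdx keys i k = some tx) :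
    i ≤ tx ∧ tx < keys.length ∧ keys.getD tx 0 = k := by
  fun_induction firstIdx keys i k with
  | case1 i h1 h2 => simp_all
  | case2 i h1 h2 ih => exact ⟨by have := (ih h).1; omega, (ih h).2.1, (ih h).2.2⟩
  | case3 i h1 => simp_all

lemma nrAux_getD (keys : List Int) :
    ∀ (m : Nat) (nxt : List (Option Nat)) (last : PySem.Dict Int Nat),
      nxt.length = keys.length → m ≤ keys.length →
      (∀ i, m ≤ i → i < keys.length → nxt.getD i none = firstIdx keys (i + 1) (keys.getD i 0)) →
      (∀ k, last.get? k = firstIdx keys m k) →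
      ∀ x, x < keys.length →
        (nrAux keys m nxt last).getD x none = firstIdx keys (x + 1) (keys.getD x 0) := by
  intro m
  induction m with
  | zero =>
    intro nxt last hlen hm hn hl x hx
    simpa [nrAux] using hn x (Nat.zero_le x) hx
  | succ m ih =>
    intro nxt last hlen hm hn hl x hx
    simp only [nrAux]
    apply ih
    · simpa using hlen
    · omega
    · intro i hmi hil
      by_cases him : i = m
      · subst him
        have hi' : i < nxt.length := by omega
        simp only [List.getD_eq_getElem?_getD, List.getElem?_set_self hi', Option.getD_some]
        exact hl _
      · have := hn i (by omega) hil
        simpa [List.getD_eq_getElem?_getD, List.getElem?_set_ne (fun he => him he.symm)] using this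
    · intro k
      have hmlt : m < keys.length := by omega
      rw [PySem.Dict.get?_insert, firstIdx_pos hmlt]
      by_cases hk : k = keys.getD m 0
      · simp [hk]
      · rw [if_neg hk, if_neg (fun h => hk h.symm)]
        exact hl k
    · exact hx

lemma nextRight_getD {keys : List Int} {x : Nat} (hx : x < keys.length) :
    (nextRight keys).getD x none = firstIdx keys (x + 1) (keys.getD x 0) := by
  unfold nextRight
  exact nrAux_getD keys keys.length _ _ (by simp) le_rfl
    (fun i h1 h2 => absurd h2 (by omega))
    (fun k => by simp [PySem.Dict.get?_empty, firstIdx_none (le_refl keys.length)])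
    x hx

lemma rowLoop_eq (state : List Int) (qx : Nat) (qy bX bY : Int) :
    ∀ (fuel x : Nat) (c : Int) (counted : List Int), state.length - x ≤ fuel →
      rowLoop state state.length qx qy bX bY fuel x c counted =
      match firstIdx state x qy with
      | some tx =>
        if qy = bY ∧ (x : Int) ≤ bX ∧ bX ≤ (tx : Int) then (c, counted)
        else (c + incConflicts qx tx counted, (counted.set qx 1).set tx 1)
      | none => (c, counted) := by
  intro fuel
  induction fuel with
  | zero =>
    intro x c counted hf
    rw [firstIdx_none (show state.length ≤ x by omega)]
    rfl
  | succ fuel ih =>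
    intro x c counted hf
    by_cases hx : x < state.length
    · by_cases hb : qy = bY ∧ (x : Int) = bX
      · simp only [rowLoop, if_pos hx, if_pos hb]
        obtain ⟨hb1, hb2⟩ := hb
        cases hfi : firstIdx state x qy with
        | none => rfl
        | some tx =>
            obtain ⟨hle, hlt, hkey⟩ := firstIdx_some hfi
            simp only [hfi]
            rw [if_pos ⟨hb1, by omega, by omega⟩]
      · by_cases hm : qy = state.getD x 0
        · simp only [rowLoop, if_pos hx, if_neg hb, if_pos hm]
          have hfi : firstIdx state x qy = some x := by
            rw [firstIdx_pos hx, if_pos hm.symm]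
          simp only [hfi]
          rw [if_neg (by rintro ⟨h1, h2, h3⟩; exact hb ⟨h1, by omega⟩)]
        · simp only [rowLoop, if_pos hx, if_neg hb, if_neg hm]
          rw [ih (x + 1) c counted (by omega)]
          have hfx : firstIdx state x qy = firstIdx state (x + 1) qy := by
            rw [firstIdx_pos hx, if_neg (fun he => hm he.symm)]
          rw [hfx]
          cases hfi : firstIdx state (x + 1) qy with
          | none => rfl
          | some tx =>
              obtain ⟨hle, hlt, hkey⟩ := firstIdx_some hfi
              simp only [hfi]
              have hcond : (qy = bY ∧ ((x : Nat) + 1 : Int) ≤ bX ∧ bX ≤ (tx : Int)) ↔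
                  (qy = bY ∧ ((x : Nat) : Int) ≤ bX ∧ bX ≤ (tx : Int)) := by
                constructor
                · rintro ⟨a, b, c'⟩; exact ⟨a, by omega, c'⟩
                · rintro ⟨a, b, c'⟩
                  have hxne : ((x : Nat) : Int) ≠ bX := fun he => hb ⟨a, he⟩
                  exact ⟨a, by omega, c'⟩
              rw [if_congr (by push_cast at hcond ⊢; exact hcond) rfl rfl]
    · simp only [rowLoop, if_neg hx, firstIdx_none (show state.length ≤ x by omega)]

lemma upLoop_eq (state : List Int) (qx : Nat) (qy bX bY : Int) :
    ∀ (fuel x : Nat) (c : Int) (counted : List Int), state.length - x ≤ fuel →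
      upLoop state state.length qx qy bX bY fuel x c counted =
      match firstIdx ((List.range state.length).map (fun t => state.getD t 0 - (t : Int))) (qx + x) (qy - (qx : Int)) with
      | some tx =>
        if (state.length : Int) ≤ state.getD tx 0 then (c, counted)
        else if bY - bX = qy - (qx : Int) ∧ ((qx : Int) + (x : Int)) ≤ bX ∧ bX ≤ (tx : Int) then (c, counted)
        else (c + incConflicts qx tx counted, (counted.set qx 1).set tx 1)
      | none => (c, counted) := by
  have hKlen : ((List.range state.length).map (fun t => state.getD t 0 - (t : Int))).length = state.length := by simp
  have hKget : ∀ t, t < state.length →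
      ((List.range state.length).map (fun t => state.getD t 0 - (t : Int))).getD t 0 = state.getD t 0 - (t : Int) := by
    intro t ht
    simp [List.getD_eq_getElem?_getD, ht]
  intro fuel
  induction fuel with
  | zero =>
    intro x c counted hf
    rw [firstIdx_none (show ((List.range state.length).map (fun t => state.getD t 0 - (t : Int))).length ≤ qx + x by rw [hKlen]; omega)]
    rfl
  | succ fuel ih =>
    intro x c counted hf
    by_cases hx : x < state.length
    · by_cases hbnd : state.length ≤ qx + x ∨ (state.length : Int) ≤ qy + (x : Int)
      · simp only [upLoop, if_pos hx, if_pos hbnd]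
        cases hfi : firstIdx ((List.range state.length).map (fun t => state.getD t 0 - (t : Int))) (qx + x) (qy - (qx : Int)) with
        | none => rfl
        | some t =>
            obtain ⟨hle, hlt, hkey⟩ := firstIdx_some hfi
            rw [hKlen] at hlt
            rw [hKget t hlt] at hkey
            simp only [hfi]
            rcases hbnd with hb' | hb'
            · exact absurd hlt (by omega)
            · rw [if_pos (by omega)]
      · obtain ⟨hn1, hn2⟩ := not_or.mp hbnd
        by_cases hbould : ((qx + x : Nat) : Int) = bX ∧ qy + (x : Int) = bY
        · simp only [upLoop, if_pos hx, if_neg hbnd, if_pos hbould]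
          obtain ⟨hbx, hby⟩ := hbould
          cases hfi : firstIdx ((List.range state.length).map (fun t => state.getD t 0 - (t : Int))) (qx + x) (qy - (qx : Int)) with
          | none => rfl
          | some t =>
              obtain ⟨hle, hlt, hkey⟩ := firstIdx_some hfi
              rw [hKlen] at hlt
              rw [hKget t hlt] at hkey
              simp only [hfi]
              by_cases hbig : (state.length : Int) ≤ state.getD t 0
              · rw [if_pos hbig]
              · rw [if_neg hbig, if_pos ⟨by omega, by omega, by omega⟩]
        · by_cases hm : qy + (x : Int) = state.getD (qx + x) 0
          · simp only [upLoop, if_pos hx, if_neg hbnd, if_neg hbould, if_pos hm]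
            have hfi : firstIdx ((List.range state.length).map (fun t => state.getD t 0 - (t : Int))) (qx + x) (qy - (qx : Int)) = some (qx + x) := by
              rw [firstIdx_pos (show qx + x < ((List.range state.length).map (fun t => state.getD t 0 - (t : Int))).length by rw [hKlen]; omega),
                hKget _ (by omega), if_pos (by push_cast; omega)]
            simp only [hfi]
            rw [if_neg (by push_cast; omega)]
            rw [if_neg (by rintro ⟨hd, hl2, hr2⟩; exact hbould ⟨by push_cast at hl2 hr2 ⊢; omega, by push_cast at hl2 hr2 hd ⊢; omega⟩)]
          · simp only [upLoop, if_pos hx, if_neg hbnd, if_neg hbould, if_neg hm]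
            rw [ih (x + 1) c counted (by omega)]
            have hfx : firstIdx ((List.range state.length).map (fun t => state.getD t 0 - (t : Int))) (qx + x) (qy - (qx : Int)) = firstIdx ((List.range state.length).map (fun t => state.getD t 0 - (t : Int))) (qx + (x + 1)) (qy - (qx : Int)) := by
              rw [show qx + (x + 1) = qx + x + 1 by omega]
              rw [firstIdx_pos (show qx + x < ((List.range state.length).map (fun t => state.getD t 0 - (t : Int))).length by rw [hKlen]; omega),
                hKget _ (by omega), if_neg (by push_cast; intro he; exact hm (by omega))]
            rw [hfx]
            cases hfi : firstIdx ((List.range state.length).map (fun t => state.getD t 0 - (t : Int))) (qx + (x + 1)) (qy - (qx : Int)) with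
            | none => rfl
            | some t =>
                obtain ⟨hle, hlt, hkey⟩ := firstIdx_some hfi
                rw [hKlen] at hlt
                rw [hKget t hlt] at hkey
                simp only [hfi]
                by_cases hbig : (state.length : Int) ≤ state.getD t 0
                · rw [if_pos hbig, if_pos hbig]
                · rw [if_neg hbig, if_neg hbig]
                  have hcond : (bY - bX = qy - (qx : Int) ∧ (qx : Int) + ((x : Int) + 1) ≤ bX ∧ bX ≤ (t : Int)) ↔
                      (bY - bX = qy - (qx : Int) ∧ (qx : Int) + (x : Int) ≤ bX ∧ bX ≤ (t : Int)) := by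
                    constructor
                    · rintro ⟨a, b, c'⟩; exact ⟨a, by omega, c'⟩
                    · rintro ⟨a, b, c'⟩
                      refine ⟨a, ?_, c'⟩
                      have hne : (qx : Int) + (x : Int) ≠ bX := fun he => hbould ⟨by push_cast; omega, by omega⟩
                      omega
                  rw [if_congr (by push_cast at hcond ⊢; exact hcond) rfl rfl]
    · simp only [upLoop, if_neg hx,
        firstIdx_none (show ((List.range state.length).map (fun t => state.getD t 0 - (t : Int))).length ≤ qx + x by rw [hKlen]; omega)]

lemma lowLoop_eq (state : List Int) (qx : Nat) (qy bX bY : Int) :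
    ∀ (fuel x : Nat) (c : Int) (counted : List Int), state.length - x ≤ fuel →
      lowLoop state state.length qx qy bX bY fuel x c counted =
      match firstIdx ((List.range state.length).map (fun t => state.getD t 0 + (t : Int))) (qx + x) (qy + (qx : Int)) with
      | some tx =>
        if state.getD tx 0 < 0 then (c, counted)
        else if bX + bY = (qx : Int) + qy ∧ ((qx : Int) + (x : Int)) ≤ bX ∧ bX ≤ (tx : Int) then (c, counted)
        else (c + incConflicts qx tx counted, (counted.set qx 1).set tx 1)
      | none => (c, counted) := by
  have hKlen : ((List.range state.length).map (fun t => state.getD t 0 + (t : Int))).length = state.length := by simp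
  have hKget : ∀ t, t < state.length →
      ((List.range state.length).map (fun t => state.getD t 0 + (t : Int))).getD t 0 = state.getD t 0 + (t : Int) := by
    intro t ht
    simp [List.getD_eq_getElem?_getD, ht]
  intro fuel
  induction fuel with
  | zero =>
    intro x c counted hf
    rw [firstIdx_none (show ((List.range state.length).map (fun t => state.getD t 0 + (t : Int))).length ≤ qx + x by rw [hKlen]; omega)]
    rfl
  | succ fuel ih =>
    intro x c counted hf
    by_cases hx : x < state.length
    · by_cases hbnd : state.length ≤ qx + x ∨ qy - (x : Int) < 0
      · simp only [lowLoop, if_pos hx, if_pos hbnd]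
        cases hfi : firstIdx ((List.range state.length).map (fun t => state.getD t 0 + (t : Int))) (qx + x) (qy + (qx : Int)) with
        | none => rfl
        | some t =>
            obtain ⟨hle, hlt, hkey⟩ := firstIdx_some hfi
            rw [hKlen] at hlt
            rw [hKget t hlt] at hkey
            simp only [hfi]
            rcases hbnd with hb' | hb'
            · exact absurd hlt (by omega)
            · rw [if_pos (by omega)]
      · obtain ⟨hn1, hn2⟩ := not_or.mp hbnd
        by_cases hbould : ((qx + x : Nat) : Int) = bX ∧ qy - (x : Int) = bY
        · simp only [lowLoop, if_pos hx, if_neg hbnd, if_pos hbould]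
          obtain ⟨hbx, hby⟩ := hbould
          cases hfi : firstIdx ((List.range state.length).map (fun t => state.getD t 0 + (t : Int))) (qx + x) (qy + (qx : Int)) with
          | none => rfl
          | some t =>
              obtain ⟨hle, hlt, hkey⟩ := firstIdx_some hfi
              rw [hKlen] at hlt
              rw [hKget t hlt] at hkey
              simp only [hfi]
              by_cases hbig : state.getD t 0 < 0
              · rw [if_pos hbig]
              · rw [if_neg hbig, if_pos ⟨by omega, by omega, by omega⟩]
        · by_cases hm : qy - (x : Int) = state.getD (qx + x) 0
          · simp only [lowLoop, if_pos hx, if_neg hbnd, if_neg hbould, if_pos hm]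
            have hfi : firstIdx ((List.range state.length).map (fun t => state.getD t 0 + (t : Int))) (qx + x) (qy + (qx : Int)) = some (qx + x) := by
              rw [firstIdx_pos (show qx + x < ((List.range state.length).map (fun t => state.getD t 0 + (t : Int))).length by rw [hKlen]; omega),
                hKget _ (by omega), if_pos (by push_cast; omega)]
            simp only [hfi]
            rw [if_neg (by push_cast; omega)]
            rw [if_neg (by rintro ⟨hd, hl2, hr2⟩; exact hbould ⟨by push_cast at hl2 hr2 ⊢; omega, by push_cast at hl2 hr2 hd ⊢; omega⟩)]
          · simp only [lowLoop, if_pos hx, if_neg hbnd, if_neg hbould, if_neg hm]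
            rw [ih (x + 1) c counted (by omega)]
            have hfx : firstIdx ((List.range state.length).map (fun t => state.getD t 0 + (t : Int))) (qx + x) (qy + (qx : Int)) = firstIdx ((List.range state.length).map (fun t => state.getD t 0 + (t : Int))) (qx + (x + 1)) (qy + (qx : Int)) := by
              rw [show qx + (x + 1) = qx + x + 1 by omega]
              rw [firstIdx_pos (show qx + x < ((List.range state.length).map (fun t => state.getD t 0 + (t : Int))).length by rw [hKlen]; omega),
                hKget _ (by omega), if_neg (by push_cast; intro he; exact hm (by omega))]
            rw [hfx]
            cases hfi : firstIdx ((List.range state.length).map (fun t => state.getD t 0 + (t : Int))) (qx + (x + 1)) (qy + (qx : Int)) with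
            | none => rfl
            | some t =>
                obtain ⟨hle, hlt, hkey⟩ := firstIdx_some hfi
                rw [hKlen] at hlt
                rw [hKget t hlt] at hkey
                simp only [hfi]
                by_cases hbig : state.getD t 0 < 0
                · rw [if_pos hbig, if_pos hbig]
                · rw [if_neg hbig, if_neg hbig]
                  have hcond : (bX + bY = (qx : Int) + qy ∧ (qx : Int) + ((x : Int) + 1) ≤ bX ∧ bX ≤ (t : Int)) ↔
                      (bX + bY = (qx : Int) + qy ∧ (qx : Int) + (x : Int) ≤ bX ∧ bX ≤ (t : Int)) := by
                    constructor
                    · rintro ⟨a, b, c'⟩; exact ⟨a, by omega, c'⟩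
                    · rintro ⟨a, b, c'⟩
                      refine ⟨a, ?_, c'⟩
                      have hne : (qx : Int) + (x : Int) ≠ bX := fun he => hbould ⟨by push_cast; omega, by omega⟩
                      omega
                  rw [if_congr (by push_cast at hcond ⊢; exact hcond) rfl rfl]
    · simp only [lowLoop, if_neg hx,
        firstIdx_none (show ((List.range state.length).map (fun t => state.getD t 0 + (t : Int))).length ≤ qx + x by rw [hKlen]; omega)]

lemma rowStep_eq (state : List Int) (bX bY : Int) (qx : Nat) (h : qx < state.length)
    (c : Int) (counted : List Int) :
    rowLoop state state.length qx (state.getD qx 0) bX bY state.length (qx + 1) c counted =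
    match (nextRight state).getD qx none with
    | some tx =>
      if ¬(bY = state.getD qx 0 ∧ (qx : Int) < bX ∧ bX ≤ (tx : Int)) then
        (c + (2 - counted.getD qx 0 - counted.getD tx 0), (counted.set qx 1).set tx 1)
      else (c, counted)
    | none => (c, counted) := by
  rw [rowLoop_eq state qx (state.getD qx 0) bX bY state.length (qx + 1) c counted (by omega),
    nextRight_getD h]
  cases hfi : firstIdx state (qx + 1) (state.getD qx 0) with
  | none => rfl
  | some tx =>
      simp only [hfi]
      by_cases hblk : bY = state.getD qx 0 ∧ (qx : Int) < bX ∧ bX ≤ (tx : Int)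
      · rw [if_pos ⟨hblk.1.symm, by have := hblk.2.1; push_cast; omega, hblk.2.2⟩,
          if_neg (not_not_intro hblk)]
      · rw [if_neg (fun hc => hblk ⟨hc.1.symm, by have := hc.2.1; push_cast at this; omega, hc.2.2⟩),
          if_pos hblk]
        rfl

lemma upStep_eq (state : List Int) (bX bY : Int) (qx : Nat) (h : qx < state.length)
    (c : Int) (counted : List Int) :
    upLoop state state.length qx (state.getD qx 0) bX bY state.length 1 c counted =
    match (nextRight ((List.range state.length).map (fun x => state.getD x 0 - (x : Int)))).getD qx none with
    | some tx =>
      if state.getD tx 0 < (state.length : Int) ∧ ¬(bY - bX = state.getD qx 0 - (qx : Int) ∧ (qx : Int) < bX ∧ bX ≤ (tx : Int)) then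
        (c + (2 - counted.getD qx 0 - counted.getD tx 0), (counted.set qx 1).set tx 1)
      else (c, counted)
    | none => (c, counted) := by
  have hKlen : ((List.range state.length).map (fun t => state.getD t 0 - (t : Int))).length = state.length := by simp
  have hKget : ((List.range state.length).map (fun t => state.getD t 0 - (t : Int))).getD qx 0 = state.getD qx 0 - (qx : Int) := by
    simp [List.getD_eq_getElem?_getD, h]
  rw [upLoop_eq state qx (state.getD qx 0) bX bY state.length 1 c counted (by omega),
    nextRight_getD (by rw [hKlen]; exact h), hKget]
  cases hfi : firstIdx ((List.range state.length).map (fun t => state.getD t 0 - (t : Int))) (qx + 1) (state.getD qx 0 - (qx : Int)) with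
  | none => rfl
  | some tx =>
      simp only [hfi]
      by_cases hbig : (state.length : Int) ≤ state.getD tx 0
      · rw [if_pos hbig, if_neg (fun hc => absurd hc.1 (not_lt.mpr hbig))]
      · rw [if_neg hbig]
        by_cases hblk : bY - bX = state.getD qx 0 - (qx : Int) ∧ (qx : Int) < bX ∧ bX ≤ (tx : Int)
        · rw [if_pos ⟨hblk.1, by have := hblk.2.1; push_cast; omega, hblk.2.2⟩,
            if_neg (fun hc => hc.2 hblk)]
        · rw [if_neg (fun hc => hblk ⟨hc.1, by have := hc.2.1; push_cast at this; omega, hc.2.2⟩),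
            if_pos ⟨not_le.mp hbig, hblk⟩]
          rfl

lemma lowStep_eq (state : List Int) (bX bY : Int) (qx : Nat) (h : qx < state.length)
    (c : Int) (counted : List Int) :
    lowLoop state state.length qx (state.getD qx 0) bX bY state.length 1 c counted =
    match (nextRight ((List.range state.length).map (fun x => state.getD x 0 + (x : Int)))).getD qx none with
    | some tx =>
      if 0 ≤ state.getD tx 0 ∧ ¬(bX + bY = (qx : Int) + state.getD qx 0 ∧ (qx : Int) < bX ∧ bX ≤ (tx : Int)) then
        (c + (2 - counted.getD qx 0 - counted.getD tx 0), (counted.set qx 1).set tx 1)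
      else (c, counted)
    | none => (c, counted) := by
  have hKlen : ((List.range state.length).map (fun t => state.getD t 0 + (t : Int))).length = state.length := by simp
  have hKget : ((List.range state.length).map (fun t => state.getD t 0 + (t : Int))).getD qx 0 = state.getD qx 0 + (qx : Int) := by
    simp [List.getD_eq_getElem?_getD, h]
  rw [lowLoop_eq state qx (state.getD qx 0) bX bY state.length 1 c counted (by omega),
    nextRight_getD (by rw [hKlen]; exact h), hKget]
  cases hfi : firstIdx ((List.range state.length).map (fun t => state.getD t 0 + (t : Int))) (qx + 1) (state.getD qx 0 + (qx : Int)) with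
  | none => rfl
  | some tx =>
      simp only [hfi]
      by_cases hbig : state.getD tx 0 < 0
      · rw [if_pos hbig, if_neg (fun hc => absurd hc.1 (not_le.mpr hbig))]
      · rw [if_neg hbig]
        by_cases hblk : bX + bY = (qx : Int) + state.getD qx 0 ∧ (qx : Int) < bX ∧ bX ≤ (tx : Int)
        · rw [if_pos ⟨hblk.1, by have := hblk.2.1; push_cast; omega, hblk.2.2⟩,
            if_neg (fun hc => hc.2 hblk)]
        · rw [if_neg (fun hc => hblk ⟨hc.1, by have := hc.2.1; push_cast at this; omega, hc.2.2⟩),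
            if_pos ⟨not_lt.mp hbig, hblk⟩]
          rfl

lemma outer_eq (state : List Int) (bX bY : Int) :
    ∀ (fuel qx : Nat) (c : Int) (counted : List Int),
      outerLoop state state.length bX bY fuel qx c counted =
      altLoop state state.length bX bY (nextRight state)
        (nextRight ((List.range state.length).map (fun x => state.getD x 0 - (x : Int))))
        (nextRight ((List.range state.length).map (fun x => state.getD x 0 + (x : Int))))
        fuel qx c counted := by
  intro fuel
  induction fuel with
  | zero => intro qx c counted; rfl
  | succ fuel ih =>
    intro qx c counted
    by_cases h : qx < state.length
    · simp only [outerLoop, altLoop, if_pos h]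
      rw [← rowStep_eq state bX bY qx h, ← upStep_eq state bX bY qx h, ← lowStep_eq state bX bY qx h]
      rw [ih]
    · simp only [outerLoop, altLoop, if_neg h]

-- ===== VERDICT (by name: the statement is the Claim_ definition above) =====
theorem f_spec : Claim_equal_f := by
  intro state bX bY _
  unfold Spec_f f f_alt
  exact outer_eq state bX bY state.length 0 0 (List.replicate state.length 0)
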